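-- pv_equiv track=rewrite | github.com/L-eo/k-means_python3 | fmaxmin.py | fmaxmin
-- ===== SOURCE A (Python) =====
-- def fmaxmin(a = [[0,0],[1,1],[2,2]]):
--     num = len(a);
--     dim = len(a[0]);
--     max_ver = a[0][:];
--     min_ver = a[0][:];
--     for i in a:
--         for j in range(dim):
--             if(i[j] > max_ver[j]):
--                 max_ver[j] = i[j]
--             if(i[j] < min_ver[j]):
--                 min_ver[j] = i[j]
--
--     return (min_ver, max_ver)
-- ===== SOURCE B (Python) =====
-- def fmaxmin(a = [[0,0],[1,1],[2,2]]):
--     dim = len(a[0])  # raises IndexError on empty input, as in the original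
--     cols = list(zip(*a))
--     return ([min(c) for c in cols], [max(c) for c in cols])
-- ===== Notes on version B (the rewrite author's own statement) =====
-- stated objective: idiomatic
-- what changed: B transposes the point list into columns with zip(*a) and takes builtin min/max per column, instead of scanning all points while updating two running vectors in place.
import Mathlib
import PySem

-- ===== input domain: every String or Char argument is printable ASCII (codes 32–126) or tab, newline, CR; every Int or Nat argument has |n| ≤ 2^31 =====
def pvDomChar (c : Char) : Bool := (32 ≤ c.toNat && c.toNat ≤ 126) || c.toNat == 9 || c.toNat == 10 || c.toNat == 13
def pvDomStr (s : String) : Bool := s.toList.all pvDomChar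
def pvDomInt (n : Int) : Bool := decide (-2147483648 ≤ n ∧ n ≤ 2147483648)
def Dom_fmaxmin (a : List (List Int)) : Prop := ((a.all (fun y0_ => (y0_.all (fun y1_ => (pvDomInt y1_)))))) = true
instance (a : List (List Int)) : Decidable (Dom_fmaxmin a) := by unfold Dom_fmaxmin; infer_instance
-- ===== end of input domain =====

-- B computes per-dimension extrema by transposing into columns and taking min/max per column (idiomatic), instead of A's running min/max vectors updated in place.


-- ===== PORT A =====
-- Literal port of A: outer loop over rows, inner loop over range(dim) updating the
-- min/max vectors in place; i[j] is read with getD 0 (in range under Pre_fmaxmin).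
def fmaxminStep (dim : Nat) (mv : List Int × List Int) (i : List Int) : List Int × List Int :=
  (List.range dim).foldl (fun p j =>
    let x := i.getD j 0
    let mx := if x > p.2.getD j 0 then p.2.set j x else p.2
    let mn := if x < p.1.getD j 0 then p.1.set j x else p.1
    (mn, mx)) mv

def fmaxmin (a : List (List Int)) : List Int × List Int :=
  match a with
  | [] => ([], [])   -- Python raises IndexError at a[0]; excluded by Pre_fmaxmin
  | first :: _ =>
    let dim := first.length
    let r := a.foldl (fun mv i => fmaxminStep dim mv i) (first, first)
    (r.1, r.2)

-- ===== PORT B =====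
-- zip(*a): columns j for j < min row length (zip truncates to the shortest row)
def pyZipStar (a : List (List Int)) : List (List Int) :=
  let m := ((a.map List.length).min?).getD 0
  (List.range m).map (fun j => a.map (fun r => r.getD j 0))

def fmaxmin_alt (a : List (List Int)) : List Int × List Int :=
  match a with
  | [] => ([], [])   -- Python raises IndexError at a[0] (the dim = len(a[0]) line)
  | _ :: _ =>
    let cols := pyZipStar a
    (cols.map (fun c => (c.min?).getD 0), cols.map (fun c => (c.max?).getD 0))

-- ===== PRECONDITION & SPEC =====
-- Pre_ excludes exactly the inputs on which A raises: the empty list (a[0]) and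
-- inputs with a row shorter than the first row (i[j] IndexError in the loop).
def Pre_fmaxmin (a : List (List Int)) : Prop :=
  a ≠ [] ∧ ∀ r ∈ a, (a.headD []).length ≤ r.length
instance (a : List (List Int)) : Decidable (Pre_fmaxmin a) := by unfold Pre_fmaxmin; infer_instance

def pvWitness_fmaxmin : List (List Int) := [[0, 5], [1, 1], [2, -2]]

def Spec_fmaxmin (a : List (List Int)) (out : List Int × List Int) : Prop := out = fmaxmin_alt a
instance (a : List (List Int)) (out : List Int × List Int) : Decidable (Spec_fmaxmin a out) := by unfold Spec_fmaxmin; infer_instance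

-- ===== CLAIM (what is proved, stated in full; the proofs are below) =====
def Claim_equal_fmaxmin : Prop := ∀ (a : List (List Int)), Dom_fmaxmin a → Pre_fmaxmin a → Spec_fmaxmin a (fmaxmin a)

-- ===== LEMMAS AND PROOFS =====
theorem set_map_range {n d : Nat} (f : Nat → Int) (v : Int) : ((List.range n).map f).set d v = (List.range n).map (fun j => if j = d then v else f j) := by
  apply List.ext_getElem
  · simp
  · intro i h1 h2
    simp only [List.getElem_set, List.getElem_map, List.getElem_range]
    by_cases hc : d = i
    · subst hc; simp
    · rw [if_neg hc, if_neg (fun h => hc h.symm)]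

theorem min_update (x : Nat → Int) (f : Nat → Int) (d n : Nat) (hd : d < n) :
    (if x d < f d then ((List.range n).map (fun j => if j < d then min (f j) (x j) else f j)).set d (x d)
     else (List.range n).map (fun j => if j < d then min (f j) (x j) else f j))
    = (List.range n).map (fun j => if j < d + 1 then min (f j) (x j) else f j) := by
  by_cases hx : x d < f d
  · rw [if_pos hx, set_map_range]
    apply List.map_congr_left; intro j hj; simp only [List.mem_range] at hj
    by_cases h1 : j = d
    · subst h1; rw [if_pos rfl, if_pos (Nat.lt_succ_self j), min_eq_right hx.le]
    · rw [if_neg h1]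
      by_cases h2 : j < d
      · rw [if_pos h2, if_pos (by omega)]
      · rw [if_neg h2, if_neg (by omega)]
  · rw [if_neg hx]
    apply List.map_congr_left; intro j hj; simp only [List.mem_range] at hj
    by_cases h1 : j = d
    · subst h1; rw [if_neg (lt_irrefl j), if_pos (Nat.lt_succ_self j), min_eq_left (by omega)]
    · by_cases h2 : j < d
      · rw [if_pos h2, if_pos (by omega)]
      · rw [if_neg h2, if_neg (by omega)]

theorem max_update (x : Nat → Int) (g : Nat → Int) (d n : Nat) (hd : d < n) :
    (if x d > g d then ((List.range n).map (fun j => if j < d then max (g j) (x j) else g j)).set d (x d)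
     else (List.range n).map (fun j => if j < d then max (g j) (x j) else g j))
    = (List.range n).map (fun j => if j < d + 1 then max (g j) (x j) else g j) := by
  by_cases hx : x d > g d
  · rw [if_pos hx, set_map_range]
    apply List.map_congr_left; intro j hj; simp only [List.mem_range] at hj
    by_cases h1 : j = d
    · subst h1; rw [if_pos rfl, if_pos (Nat.lt_succ_self j), max_eq_right hx.le]
    · rw [if_neg h1]
      by_cases h2 : j < d
      · rw [if_pos h2, if_pos (by omega)]
      · rw [if_neg h2, if_neg (by omega)]
  · rw [if_neg hx]
    apply List.map_congr_left; intro j hj; simp only [List.mem_range] at hj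
    by_cases h1 : j = d
    · subst h1; rw [if_neg (lt_irrefl j), if_pos (Nat.lt_succ_self j), max_eq_left (by omega)]
    · by_cases h2 : j < d
      · rw [if_pos h2, if_pos (by omega)]
      · rw [if_neg h2, if_neg (by omega)]

theorem step_aux (n : Nat) (i : List Int) (f g : Nat → Int) :
    ∀ d ≤ n, (List.range d).foldl (fun p j =>
      let x := i.getD j 0
      let mx := if x > p.2.getD j 0 then p.2.set j x else p.2
      let mn := if x < p.1.getD j 0 then p.1.set j x else p.1
      (mn, mx)) ((List.range n).map f, (List.range n).map g)
    = ((List.range n).map (fun j => if j < d then min (f j) (i.getD j 0) else f j),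
       (List.range n).map (fun j => if j < d then max (g j) (i.getD j 0) else g j)) := by
  intro d hd
  induction d with
  | zero => simp
  | succ d ih =>
    rw [List.range_succ, List.foldl_append, ih (by omega)]
    simp only [List.foldl_cons, List.foldl_nil]
    rw [PySem.List.getD_map_range _ _ _ _ (by omega), PySem.List.getD_map_range _ _ _ _ (by omega),
        if_neg (lt_irrefl d), if_neg (lt_irrefl d)]
    rw [min_update (fun j => i.getD j 0) f d n (by omega), max_update (fun j => i.getD j 0) g d n (by omega)]

theorem map_range_if_lt (n : Nat) (A B : Nat → Int) :
    (List.range n).map (fun j => if j < n then A j else B j) = (List.range n).map A := by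
  apply List.map_congr_left; intro j hj; simp only [List.mem_range] at hj; rw [if_pos hj]

theorem self_eq_map_range (l : List Int) : l = (List.range l.length).map (fun j => l.getD j 0) := by
  apply List.ext_getElem
  · simp
  · intro i h1 h2; simp [List.getD_eq_getElem?_getD, List.getElem?_eq_getElem h1]

theorem outer_aux (n : Nat) (rest : List (List Int)) :
    ∀ f g : Nat → Int, rest.foldl (fun mv i => (List.range n).foldl (fun p j =>
      let x := i.getD j 0
      let mx := if x > p.2.getD j 0 then p.2.set j x else p.2
      let mn := if x < p.1.getD j 0 then p.1.set j x else p.1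
      (mn, mx)) mv) ((List.range n).map f, (List.range n).map g)
    = ((List.range n).map (fun j => rest.foldl (fun m r => min m (r.getD j 0)) (f j)),
       (List.range n).map (fun j => rest.foldl (fun m r => max m (r.getD j 0)) (g j))) := by
  induction rest with
  | nil => intro f g; simp
  | cons i rest ih =>
    intro f g
    rw [List.foldl_cons, step_aux n i f g n (le_refl n), map_range_if_lt, map_range_if_lt,
        ih (fun j => min (f j) (i.getD j 0)) (fun j => max (g j) (i.getD j 0))]
    simp only [List.foldl_cons]

theorem fmaxmin_eq_alt (a : List (List Int)) (hne : a ≠ [])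
    (hall : ∀ r ∈ a, (a.headD []).length ≤ r.length) : fmaxmin a = fmaxmin_alt a := by
  obtain ⟨first, rest, rfl⟩ := List.exists_cons_of_ne_nil hne
  simp only [List.headD_cons] at hall
  have hmin : (((first :: rest).map List.length).min?) = some first.length := by
    rw [List.min?_eq_some_iff]
    constructor
    · exact List.mem_map_of_mem (l := first :: rest) List.mem_cons_self
    · intro b hb
      obtain ⟨r, hr, rfl⟩ := List.mem_map.1 hb
      exact hall r hr
  simp only [fmaxmin, fmaxmin_alt, fmaxminStep, pyZipStar, hmin, Option.getD_some]
  rw [show ((first, first) : List Int × List Int) = ((List.range first.length).map (fun j => first.getD j 0), (List.range first.length).map (fun j => first.getD j 0)) from by rw [← self_eq_map_range]]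
  rw [outer_aux first.length (first :: rest) (fun j => first.getD j 0) (fun j => first.getD j 0)]
  refine Prod.ext ?_ ?_
  · simp only [List.map_map]
    apply List.map_congr_left; intro j _
    simp only [Function.comp, List.map_cons, List.min?_cons', List.foldl_cons, Option.getD_some,
      List.foldl_map, min_self]
  · simp only [List.map_map]
    apply List.map_congr_left; intro j _
    simp only [Function.comp, List.map_cons, List.max?_cons', List.foldl_cons, Option.getD_some,
      List.foldl_map, max_self]

-- ===== VERDICT (by name: the statement is the Claim_ definition above) =====
theorem fmaxmin_spec : Claim_equal_fmaxmin := by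
  intro a _ hpre
  unfold Spec_fmaxmin
  exact fmaxmin_eq_alt a hpre.1 hpre.2
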